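-- pv_equiv track=rewrite | github.com/Nikola352/OthelloMaster | game/util.py | calculate_board_position
-- ===== SOURCE A (Python) =====
-- from copy import deepcopy
--
-- def calculate_board_position(board: list[list[int]], turn: int, move: tuple[int,int]) -> list[list[int]]:
--     res_board = deepcopy(board)
--     res_board[move[0]][move[1]] = turn
--     dirs = ((0,1), (0,-1), (1,0), (-1,0), (1,1), (1,-1), (-1,1), (-1,-1))
--     for d in dirs:
--         found_opp = False
--         found_own = False
--         i, j = move
--         i += d[0]; j += d[1]
--         while i>=0 and i<8 and j>=0 and j<8:
--             if board[i][j] == turn: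
--                 found_own = True
--                 break
--             elif board[i][j] == -turn:
--                 found_opp = True
--             else:
--                 break
--             i += d[0]; j += d[1]
--         if found_opp and found_own:
--             i, j = move
--             i += d[0]; j += d[1]
--             while i>=0 and i<8 and j>=0 and j<8 and board[i][j] != turn:
--                 res_board[i][j] = turn
--                 i += d[0]; j += d[1]
--     return res_board
-- ===== SOURCE B (Python) =====
-- def calculate_board_position(board: list[list[int]], turn: int, move: tuple[int, int]) -> list[list[int]]:
--     res_board = [row[:] for row in board]
--     res_board[move[0]][move[1]] = turn
--     for di, dj in ((0, 1), (0, -1), (1, 0), (-1, 0), (1, 1), (1, -1), (-1, 1), (-1, -1)):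
--         pending = []
--         i, j = move[0] + di, move[1] + dj
--         while 0 <= i < 8 and 0 <= j < 8:
--             v = board[i][j]
--             if v == turn:
--                 for pi, pj in pending:
--                     res_board[pi][pj] = turn
--                 break
--             if v != -turn:
--                 break
--             pending.append((i, j))
--             i += di
--             j += dj
--     return res_board
-- ===== Notes on version B (the rewrite author's own statement) =====
-- stated objective: alternative
-- what changed: Each direction is handled in one accumulate-and-commit walk keeping a pending-flip buffer that is written only when an own piece is reached, instead of A's two scans per direction (validate, then re-walk flipping).
import Mathlib
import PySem

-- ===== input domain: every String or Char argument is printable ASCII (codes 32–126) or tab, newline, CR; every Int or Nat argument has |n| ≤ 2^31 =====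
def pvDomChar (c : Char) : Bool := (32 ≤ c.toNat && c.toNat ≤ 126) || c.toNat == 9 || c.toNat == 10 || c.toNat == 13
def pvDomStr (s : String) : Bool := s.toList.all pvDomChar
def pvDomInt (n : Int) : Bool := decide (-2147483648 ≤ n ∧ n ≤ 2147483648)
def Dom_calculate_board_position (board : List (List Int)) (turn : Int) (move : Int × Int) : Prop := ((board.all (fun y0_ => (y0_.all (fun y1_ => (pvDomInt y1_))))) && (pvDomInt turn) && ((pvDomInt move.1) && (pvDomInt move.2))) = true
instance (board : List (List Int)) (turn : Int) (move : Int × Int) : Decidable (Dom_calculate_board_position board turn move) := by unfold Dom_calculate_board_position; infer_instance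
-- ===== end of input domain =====

-- B replaces A's validate-scan-then-reflip-scan per direction by one accumulate-and-commit
-- walk with a pending-flip buffer (objective: alternative decomposition, same cost).
-- Both Pythons mutate only fresh copies; the equivalence is about the return value.

-- ===== PORT A =====

-- Python list subscript write `res[i][j] = v` / read `board[i][j]`; under Pre_ every
-- access is in range (negative indices wrap by the actual length, as in Python).
def pvSetRow (row : List Int) (j : Int) (v : Int) : List Int :=
  row.set (if j < 0 then j + row.length else j).toNat v

def pvSetCell (b : List (List Int)) (i j v : Int) : List (List Int) :=
  let ii := (if i < 0 then i + b.length else i).toNat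
  b.set ii (pvSetRow (b.getD ii []) j v)

-- reads happen only under 0 ≤ i < 8 ∧ 0 ≤ j < 8, where this equals board[i][j]
def pvCell (b : List (List Int)) (i j : Int) : Int := (b.getD i.toNat []).getD j.toNat 0

def pvInR (i j : Int) : Bool := decide (0 ≤ i) && decide (i < 8) && decide (0 ≤ j) && decide (j < 8)

def pvDirs : List (Int × Int) := [(0,1), (0,-1), (1,0), (-1,0), (1,1), (1,-1), (-1,1), (-1,-1)]

-- A's first while-loop: returns (found_opp, found_own); fuel 16 > the ≤ 8 Python iterations
def scanA (b : List (List Int)) (turn : Int) (d : Int × Int) :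
    Nat → Int → Int → Bool → Bool × Bool
  | 0, _, _, opp => (opp, false)
  | f+1, i, j, opp =>
    if pvInR i j then
      let c := pvCell b i j
      if c = turn then (opp, true)
      else if c = -turn then scanA b turn d f (i + d.1) (j + d.2) true
      else (opp, false)
    else (opp, false)

-- A's second while-loop (the flipping pass)
def writeA (b : List (List Int)) (turn : Int) (d : Int × Int) :
    Nat → Int → Int → List (List Int) → List (List Int)
  | 0, _, _, res => res
  | f+1, i, j, res =>
    if pvInR i j && !(pvCell b i j == turn) then
      writeA b turn d f (i + d.1) (j + d.2) (pvSetCell res i j turn)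
    else res

def calculate_board_position (board : List (List Int)) (turn : Int) (move : Int × Int) : List (List Int) :=
  let res0 := pvSetCell board move.1 move.2 turn
  pvDirs.foldl (fun res d =>
    let s := scanA board turn d 16 (move.1 + d.1) (move.2 + d.2) false
    if s.1 && s.2 then writeA board turn d 16 (move.1 + d.1) (move.2 + d.2) res else res) res0

-- ===== PORT B =====

-- B's single walk: collect opponent cells into the pending buffer, commit on own piece
def walkB (b : List (List Int)) (turn : Int) (d : Int × Int) :
    Nat → Int → Int → List (Int × Int) → Option (List (Int × Int))
  | 0, _, _, _ => none
  | f+1, i, j, acc =>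
    if pvInR i j then
      let v := pvCell b i j
      if v = turn then some acc
      else if v = -turn then walkB b turn d f (i + d.1) (j + d.2) (acc ++ [(i, j)])
      else none
    else none

-- B's commit loop: `for pi, pj in pending: res[pi][pj] = turn`
def commitB (ps : List (Int × Int)) (turn : Int) (res : List (List Int)) : List (List Int) :=
  ps.foldl (fun r p => pvSetCell r p.1 p.2 turn) res

def calculate_board_position_alt (board : List (List Int)) (turn : Int) (move : Int × Int) : List (List Int) :=
  let res0 := pvSetCell board move.1 move.2 turn
  pvDirs.foldl (fun res d =>
    match walkB board turn d 16 (move.1 + d.1) (move.2 + d.2) [] with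
    | some ps => commitB ps turn res
    | none => res) res0

-- ===== PRECONDITION & SPEC =====
-- the cell (i,j) exists on the (possibly ragged) board
def pvHasCell (b : List (List Int)) (i j : Int) : Prop :=
  i.toNat < b.length ∧ j.toNat < (b.getD i.toNat []).length

-- Pre_ = exactly the inputs on which Python A returns (no IndexError): the move is a valid
-- Python index pair into the board, and every cell a directional scan inspects (the k-th
-- cell along a direction is read when the previous cells are in-range opponent pieces)
-- exists on the board.
def Pre_calculate_board_position (board : List (List Int)) (turn : Int) (move : Int × Int) : Prop :=
  (-(board.length : Int) ≤ move.1 ∧ move.1 < board.length) ∧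
  (-(((board.getD (if move.1 < 0 then move.1 + board.length else move.1).toNat []).length) : Int) ≤ move.2 ∧
    move.2 < ((board.getD (if move.1 < 0 then move.1 + board.length else move.1).toNat []).length : Int)) ∧
  ∀ d ∈ pvDirs, ∀ k ∈ List.range 8,
    (pvInR (move.1 + ((k : Int) + 1) * d.1) (move.2 + ((k : Int) + 1) * d.2) = true ∧
     ∀ l ∈ List.range k,
       pvInR (move.1 + ((l : Int) + 1) * d.1) (move.2 + ((l : Int) + 1) * d.2) = true ∧
       pvHasCell board (move.1 + ((l : Int) + 1) * d.1) (move.2 + ((l : Int) + 1) * d.2) ∧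
       pvCell board (move.1 + ((l : Int) + 1) * d.1) (move.2 + ((l : Int) + 1) * d.2) = -turn ∧
       ¬ pvCell board (move.1 + ((l : Int) + 1) * d.1) (move.2 + ((l : Int) + 1) * d.2) = turn)
    → pvHasCell board (move.1 + ((k : Int) + 1) * d.1) (move.2 + ((k : Int) + 1) * d.2)
instance (board : List (List Int)) (turn : Int) (move : Int × Int) : Decidable (Pre_calculate_board_position board turn move) := by unfold Pre_calculate_board_position pvHasCell; infer_instance

def pvWitness_calculate_board_position : List (List Int) × Int × (Int × Int) :=
  ([[0,0,0,0,0,0,0,0],[0,0,0,0,0,0,0,0],[0,0,0,0,0,0,0,0],[0,0,0,1,-1,0,0,0],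
    [0,0,0,-1,1,0,0,0],[0,0,0,0,0,0,0,0],[0,0,0,0,0,0,0,0],[0,0,0,0,0,0,0,0]], 1, (3, 5))

def Spec_calculate_board_position (board : List (List Int)) (turn : Int) (move : Int × Int) (out : List (List Int)) : Prop := out = calculate_board_position_alt board turn move
instance (board : List (List Int)) (turn : Int) (move : Int × Int) (out : List (List Int)) : Decidable (Spec_calculate_board_position board turn move out) := by unfold Spec_calculate_board_position; infer_instance

-- ===== CLAIM (what is proved, stated in full; the proofs are below) =====
def Claim_equal_calculate_board_position : Prop := ∀ (board : List (List Int)) (turn : Int) (move : Int × Int), Dom_calculate_board_position board turn move → Pre_calculate_board_position board turn move → Spec_calculate_board_position board turn move (calculate_board_position board turn move)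

-- ===== LEMMAS AND PROOFS =====

-- common characterisation of one directional ray: the consecutive opponent cells,
-- `some ps` iff the ray ends on an own piece inside the board
def ray (b : List (List Int)) (turn : Int) (d : Int × Int) :
    Nat → Int → Int → Option (List (Int × Int))
  | 0, _, _ => none
  | f+1, i, j =>
    if pvInR i j then
      let c := pvCell b i j
      if c = turn then some []
      else if c = -turn then (ray b turn d f (i + d.1) (j + d.2)).map ((i, j) :: ·)
      else none
    else none

theorem walkB_ray (b : List (List Int)) (turn : Int) (d : Int × Int) :
    ∀ (f : Nat) (i j : Int) (acc : List (Int × Int)),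
    walkB b turn d f i j acc = (ray b turn d f i j).map (acc ++ ·) := by
  intro f
  induction f with
  | zero => intro i j acc; rfl
  | succ f ih =>
    intro i j acc
    simp only [walkB, ray]
    split_ifs with h1 h2 h3
    · simp
    · rw [ih]
      cases ray b turn d f (i + d.1) (j + d.2) <;> simp
    · rfl
    · rfl

theorem scanA_own (b : List (List Int)) (turn : Int) (d : Int × Int) :
    ∀ (f : Nat) (i j : Int) (opp : Bool),
    (scanA b turn d f i j opp).2 = (ray b turn d f i j).isSome := by
  intro f
  induction f with
  | zero => intro i j opp; rfl
  | succ f ih =>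
    intro i j opp
    simp only [scanA, ray]
    split_ifs with h1 h2 h3
    · rfl
    · rw [ih]
      cases ray b turn d f (i + d.1) (j + d.2) <;> simp
    · rfl
    · rfl

theorem scanA_opp (b : List (List Int)) (turn : Int) (d : Int × Int) :
    ∀ (f : Nat) (i j : Int) (opp : Bool) (ps : List (Int × Int)),
    ray b turn d f i j = some ps → (scanA b turn d f i j opp).1 = (opp || !ps.isEmpty) := by
  intro f
  induction f with
  | zero => intro i j opp ps h; simp [ray] at h
  | succ f ih =>
    intro i j opp ps h
    simp only [scanA]
    simp only [ray] at h
    split_ifs at h ⊢ with h1 h2 h3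
    · simp at h; simp [← h]
    · cases hr : ray b turn d f (i + d.1) (j + d.2) with
      | none => rw [hr] at h; simp at h
      | some ps' =>
        rw [hr] at h; simp at h
        rw [ih _ _ true _ hr, ← h]
        simp

theorem writeA_ray (b : List (List Int)) (turn : Int) (d : Int × Int) :
    ∀ (f : Nat) (i j : Int) (ps : List (Int × Int)) (res : List (List Int)),
    ray b turn d f i j = some ps → writeA b turn d f i j res = commitB ps turn res := by
  intro f
  induction f with
  | zero => intro i j ps res h; simp [ray] at h
  | succ f ih =>
    intro i j ps res h
    simp only [writeA]
    simp only [ray] at h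
    split_ifs at h with h1 h2 h3
    · -- cell = turn: ps = [], loop condition false
      simp at h
      have : (pvInR i j && !(pvCell b i j == turn)) = false := by simp [h1, h2]
      rw [this]; simp [h, commitB]
    · -- cell = -turn (and ≠ turn): one write then recurse
      cases hr : ray b turn d f (i + d.1) (j + d.2) with
      | none => rw [hr] at h; simp at h
      | some ps' =>
        rw [hr] at h; simp at h
        have : (pvInR i j && !(pvCell b i j == turn)) = true := by simp [h1, h2]
        rw [this]
        simp only [if_true]
        rw [ih _ _ _ _ hr, ← h]
        simp [commitB]

theorem step_eq (b : List (List Int)) (turn : Int) (move : Int × Int)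
    (d : Int × Int) (res : List (List Int)) :
    (let s := scanA b turn d 16 (move.1 + d.1) (move.2 + d.2) false
     if s.1 && s.2 then writeA b turn d 16 (move.1 + d.1) (move.2 + d.2) res else res)
    = (match walkB b turn d 16 (move.1 + d.1) (move.2 + d.2) [] with
       | some ps => commitB ps turn res
       | none => res) := by
  rw [walkB_ray]
  cases hr : ray b turn d 16 (move.1 + d.1) (move.2 + d.2) with
  | none =>
    have h2 := scanA_own b turn d 16 (move.1 + d.1) (move.2 + d.2) false
    rw [hr] at h2
    simp at h2
    simp [h2]
  | some ps =>
    have h2 := scanA_own b turn d 16 (move.1 + d.1) (move.2 + d.2) false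
    have h1 := scanA_opp b turn d 16 (move.1 + d.1) (move.2 + d.2) false ps hr
    rw [hr] at h2; simp at h2
    cases ps with
    | nil => simp at h1; simp [h1, h2, commitB]
    | cons p tl =>
      simp at h1
      simp only [h1, h2, Bool.and_self, if_true, Option.map_some, List.nil_append]
      exact writeA_ray b turn d 16 _ _ _ res hr

theorem foldl_ext {α β : Type} (f g : α → β → α) (h : ∀ a b, f a b = g a b) :
    ∀ (l : List β) (a : α), l.foldl f a = l.foldl g a := by
  intro l
  induction l with
  | nil => intro a; rfl
  | cons x xs ih => intro a; simp only [List.foldl]; rw [h]; exact ih _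

-- ===== VERDICT (by name: the statement is the Claim_ definition above) =====
theorem calculate_board_position_spec : Claim_equal_calculate_board_position := by
  intro board turn move _ _
  show calculate_board_position board turn move = calculate_board_position_alt board turn move
  unfold calculate_board_position calculate_board_position_alt
  exact foldl_ext _ _ (fun res d => step_eq board turn move d res) pvDirs _
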